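-- pv_equiv track=rewrite | github.com/FEniCS/performance-test | python/mesh.py | num_entities
-- ===== SOURCE A (Python) =====
-- def num_entities(i, j, k, nrefine):
--     nv = (i + 1) * (j + 1) * (k + 1)
--     ne = 0
--     nc = (i * j * k) * 6
--     earr = [1, 3, 7]
--     farr = [2, 12]
--     for r in range(nrefine):
--         ne = (earr[0] * (i + j + k) + earr[1] * (i * j + j * k + k * i)
--               + earr[2] * i * j * k)
--         nv += ne
--         nc *= 8
--         earr[0] *= 2
--         earr[1] *= 4
--         earr[2] *= 8
--         farr[0] *= 4
--         farr[1] *= 8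
--
--     ne = (earr[0] * (i + j + k) + earr[1] * (i * j + j * k + k * i)
--           + earr[2] * i * j * k)
--     nf = farr[0] * (i * j + j * k + k * i) + farr[1] * i * j * k
--
--     return (nv, ne, nf, nc)
-- ===== SOURCE B (Python) =====
-- def num_entities(i, j, k, nrefine):
--     n = nrefine if nrefine > 0 else 0
--     s1 = i + j + k
--     s2 = i * j + j * k + k * i
--     s3 = i * j * k
--     p2, p4, p8 = 2 ** n, 4 ** n, 8 ** n
--     nv = (i + 1) * (j + 1) * (k + 1) + (p2 - 1) * s1 + (p4 - 1) * s2 + (p8 - 1) * s3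
--     ne = p2 * s1 + 3 * p4 * s2 + 7 * p8 * s3
--     nf = 2 * p4 * s2 + 12 * p8 * s3
--     nc = 6 * s3 * p8
--     return (nv, ne, nf, nc)
-- ===== Notes on version B (the rewrite author's own statement) =====
-- stated objective: faster
-- what changed: Replaces the nrefine-step refinement loop by closed-form geometric-series sums and powers (2^n, 4^n, 8^n), computing all four counts directly.
import Mathlib
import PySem

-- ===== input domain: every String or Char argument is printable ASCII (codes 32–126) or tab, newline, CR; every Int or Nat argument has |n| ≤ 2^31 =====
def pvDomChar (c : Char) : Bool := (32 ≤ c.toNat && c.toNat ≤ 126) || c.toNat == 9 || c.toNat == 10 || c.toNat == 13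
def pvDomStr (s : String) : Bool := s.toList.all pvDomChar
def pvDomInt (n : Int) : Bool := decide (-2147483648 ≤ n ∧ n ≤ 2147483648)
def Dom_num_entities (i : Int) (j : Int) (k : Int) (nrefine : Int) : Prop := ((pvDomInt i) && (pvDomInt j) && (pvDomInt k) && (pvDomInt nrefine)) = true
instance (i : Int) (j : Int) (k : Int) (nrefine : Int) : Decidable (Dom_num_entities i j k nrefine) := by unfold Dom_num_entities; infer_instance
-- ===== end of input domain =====

-- B replaces A's refinement loop by closed-form geometric-series sums and powers (faster: O(log n) vs O(n)).

-- ===== PORT A =====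
-- A-side helper: the loop body, state (nv, ne, nc, earr[0], earr[1], earr[2], farr[0], farr[1])
def pvStep (i j k : Int) (s : Int × Int × Int × Int × Int × Int × Int × Int) :
    Int × Int × Int × Int × Int × Int × Int × Int :=
  let (nv, _ne, nc, e0, e1, e2, f0, f1) := s
  let ne := e0 * (i + j + k) + e1 * (i * j + j * k + k * i) + e2 * (i * j) * k
  (nv + ne, ne, nc * 8, e0 * 2, e1 * 4, e2 * 8, f0 * 4, f1 * 8)

def num_entities (i : Int) (j : Int) (k : Int) (nrefine : Int) : List Int :=
  let nv : Int := (i + 1) * (j + 1) * (k + 1)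
  let ne : Int := 0
  let nc : Int := (i * j * k) * 6
  let s := (PySem.List.pyRange 0 nrefine 1).foldl (fun s _ => pvStep i j k s)
    (nv, ne, nc, (1 : Int), (3 : Int), (7 : Int), (2 : Int), (12 : Int))
  let (nv, _, nc, e0, e1, e2, f0, f1) := s
  let ne := e0 * (i + j + k) + e1 * (i * j + j * k + k * i) + e2 * (i * j) * k
  let nf := f0 * (i * j + j * k + k * i) + f1 * (i * j) * k
  [nv, ne, nf, nc]

-- ===== PORT B =====
def num_entities_alt (i : Int) (j : Int) (k : Int) (nrefine : Int) : List Int :=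
  let n : Nat := (if nrefine > 0 then nrefine else 0).toNat
  let s1 := i + j + k
  let s2 := i * j + j * k + k * i
  let s3 := i * j * k
  let p2 : Int := 2 ^ n
  let p4 : Int := 4 ^ n
  let p8 : Int := 8 ^ n
  [(i + 1) * (j + 1) * (k + 1) + (p2 - 1) * s1 + (p4 - 1) * s2 + (p8 - 1) * s3,
   p2 * s1 + 3 * p4 * s2 + 7 * p8 * s3,
   2 * p4 * s2 + 12 * p8 * s3,
   6 * s3 * p8]

-- ===== PRECONDITION & SPEC =====
def Spec_num_entities (i : Int) (j : Int) (k : Int) (nrefine : Int) (out : List Int) : Prop := out = num_entities_alt i j k nrefine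
instance (i : Int) (j : Int) (k : Int) (nrefine : Int) (out : List Int) : Decidable (Spec_num_entities i j k nrefine out) := by unfold Spec_num_entities; infer_instance

-- ===== CLAIM (what is proved, stated in full; the proofs are below) =====
def Claim_equal_num_entities : Prop := ∀ (i : Int) (j : Int) (k : Int) (nrefine : Int), Dom_num_entities i j k nrefine → Spec_num_entities i j k nrefine (num_entities i j k nrefine)

-- ===== LEMMAS AND PROOFS =====

lemma pv_loop_closed (i j k : Int) (n : Nat) :
    (List.range (n + 1)).foldl (fun s _ => pvStep i j k s)
      ((i + 1) * (j + 1) * (k + 1), 0, (i * j * k) * 6, (1 : Int), (3 : Int), (7 : Int), (2 : Int), (12 : Int))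
    = ((i + 1) * (j + 1) * (k + 1)
         + (2 ^ (n + 1) - 1) * (i + j + k)
         + (4 ^ (n + 1) - 1) * (i * j + j * k + k * i)
         + (8 ^ (n + 1) - 1) * (i * j * k),
       2 ^ n * (i + j + k) + 3 * 4 ^ n * (i * j + j * k + k * i) + 7 * 8 ^ n * (i * j * k),
       (i * j * k) * 6 * 8 ^ (n + 1),
       2 ^ (n + 1), 3 * 4 ^ (n + 1), 7 * 8 ^ (n + 1), 2 * 4 ^ (n + 1), 12 * 8 ^ (n + 1)) := by
  induction n with
  | zero =>
      simp only [zero_add, List.range_one, List.foldl_cons, List.foldl_nil, pvStep, Prod.mk.injEq]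
      refine ⟨by ring, by ring, by ring, by ring, by ring, by ring, by ring, by ring⟩
  | succ m ih =>
      rw [List.range_succ, List.foldl_append, ih]
      simp only [List.foldl_cons, List.foldl_nil, pvStep, Prod.mk.injEq]
      refine ⟨by ring, by ring, by ring, by ring, by ring, by ring, by ring, by ring⟩

theorem num_entities_spec : Claim_equal_num_entities := by
  intro i j k nrefine _
  unfold Spec_num_entities
  simp only [num_entities, num_entities_alt, PySem.List.pyRange_one, List.foldl_map]
  rcases h : (nrefine - 0).toNat with _ | m
  · have hn : (if nrefine > 0 then nrefine else 0).toNat = 0 := by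
      split <;> omega
    simp only [hn, List.range_zero, List.foldl_nil, List.cons.injEq, and_true]
    refine ⟨by ring, by ring, by ring, by ring⟩
  · have hn : (if nrefine > 0 then nrefine else 0).toNat = m + 1 := by
      split <;> omega
    rw [pv_loop_closed i j k m]
    simp only [hn, List.cons.injEq, and_true]
    exact ⟨trivial, by ring, by ring, by ring⟩
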